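-- pv_equiv track=rewrite | github.com/end0tknr/saawo | src/main/python/lib/service/suumo.py | divide_rows_list
-- ===== SOURCE A (Python) =====
-- def divide_rows_list(build_type, org_rows, chunk_size):
--     i = 0
--     chunk = []
--     ret_rows = []
--     for org_row in org_rows:
--         chunk.append( (build_type, org_row) )
--
--         if len(chunk) >= chunk_size:
--             ret_rows.append(chunk)
--             chunk = []
--         i += 1
--
--     if len(chunk) > 0:
--         ret_rows.append(chunk)
--
--     return ret_rows
-- ===== SOURCE B (Python) =====
-- def divide_rows_list(build_type, org_rows, chunk_size):
--     tuples = [(build_type, r) for r in org_rows]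
--     step = chunk_size if chunk_size > 0 else 1
--     ret_rows = []
--     rest = tuples
--     while rest:
--         ret_rows.append(rest[:step])
--         rest = rest[step:]
--     return ret_rows
-- ===== Notes on version B (the rewrite author's own statement) =====
-- stated objective: simpler
-- what changed: Replaces the per-element flushing accumulator (append, compare, flush, final leftover check) with build-then-slice: map the rows to tuples once, then repeatedly slice off the next step-sized chunk (step = chunk_size, or 1 when chunk_size <= 0, reproducing A's singleton behaviour).
import Mathlib
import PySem

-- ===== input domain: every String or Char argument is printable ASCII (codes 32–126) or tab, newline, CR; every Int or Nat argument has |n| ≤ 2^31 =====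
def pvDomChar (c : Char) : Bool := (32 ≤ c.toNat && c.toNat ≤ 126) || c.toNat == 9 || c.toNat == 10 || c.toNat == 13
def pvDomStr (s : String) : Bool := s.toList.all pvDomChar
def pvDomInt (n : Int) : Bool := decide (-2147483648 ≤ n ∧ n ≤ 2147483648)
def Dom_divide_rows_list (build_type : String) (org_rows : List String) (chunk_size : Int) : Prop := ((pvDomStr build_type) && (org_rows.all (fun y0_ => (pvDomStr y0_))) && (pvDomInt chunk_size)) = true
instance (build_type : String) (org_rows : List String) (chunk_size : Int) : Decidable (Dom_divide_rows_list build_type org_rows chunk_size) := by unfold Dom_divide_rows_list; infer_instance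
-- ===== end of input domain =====

-- B replaces A's flushing accumulator by build-then-slice (map rows to tuples once, then repeatedly slice off the next step-sized chunk): simpler decomposition, same O(n) cost.


-- ===== PORT A =====
-- literal port of A's loop: state = (chunk, ret_rows); the unused counter `i` is dropped.
def divide_rows_list (build_type : String) (org_rows : List String) (chunk_size : Int) : List (List (String × String)) :=
  let st := org_rows.foldl
    (fun (st : List (String × String) × List (List (String × String))) org_row =>
      let chunk := st.1 ++ [(build_type, org_row)]
      if chunk_size ≤ (chunk.length : Int) then ([], st.2 ++ [chunk]) else (chunk, st.2))
    ([], [])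
  if 0 < st.1.length then st.2 ++ [st.1] else st.2

-- ===== PORT B =====
-- B's while loop `rest[:step] / rest[step:]` as recursion on `rest`; the `0, l` case
-- is only a totality guard (divide_rows_list_alt always passes step ≥ 1).
def chunksB : Nat → List (String × String) → List (List (String × String))
  | _, [] => []
  | 0, l => [l]
  | s+1, x :: xs => ((x :: xs).take (s+1)) :: chunksB (s+1) ((x :: xs).drop (s+1))
termination_by _ l => l.length
decreasing_by simp

def divide_rows_list_alt (build_type : String) (org_rows : List String) (chunk_size : Int) : List (List (String × String)) :=
  let tuples := org_rows.map (fun r => (build_type, r))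
  let step : Nat := if 0 < chunk_size then chunk_size.toNat else 1
  chunksB step tuples

-- ===== PRECONDITION & SPEC =====
def Spec_divide_rows_list (build_type : String) (org_rows : List String) (chunk_size : Int) (out : List (List (String × String))) : Prop := out = divide_rows_list_alt build_type org_rows chunk_size
instance (build_type : String) (org_rows : List String) (chunk_size : Int) (out : List (List (String × String))) : Decidable (Spec_divide_rows_list build_type org_rows chunk_size out) := by unfold Spec_divide_rows_list; infer_instance

-- ===== CLAIM (what is proved, stated in full; the proofs are below) =====
def Claim_equal_divide_rows_list : Prop := ∀ (build_type : String) (org_rows : List String) (chunk_size : Int), Dom_divide_rows_list build_type org_rows chunk_size → Spec_divide_rows_list build_type org_rows chunk_size (divide_rows_list build_type org_rows chunk_size)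

-- ===== LEMMAS AND PROOFS =====

-- A's loop step with the flush test expressed on Nat (step = s).
def stepN (build_type : String) (s : Nat)
    (st : List (String × String) × List (List (String × String))) (org_row : String) :
    List (String × String) × List (List (String × String)) :=
  let chunk := st.1 ++ [(build_type, org_row)]
  if s ≤ chunk.length then ([], st.2 ++ [chunk]) else (chunk, st.2)

lemma stepA_eq_stepN (build_type : String) (chunk_size : Int) :
    (fun (st : List (String × String) × List (List (String × String))) org_row =>
      let chunk := st.1 ++ [(build_type, org_row)]
      if chunk_size ≤ (chunk.length : Int) then ([], st.2 ++ [chunk]) else (chunk, st.2))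
    = stepN build_type (if 0 < chunk_size then chunk_size.toNat else 1) := by
  funext st r
  simp only [stepN]
  have h : (chunk_size ≤ ((st.1 ++ [(build_type, r)]).length : Int)) ↔
      ((if 0 < chunk_size then chunk_size.toNat else 1) ≤ (st.1 ++ [(build_type, r)]).length) := by
    simp only [List.length_append, List.length_cons, List.length_nil]
    split <;> omega
  rw [if_congr h rfl rfl]

lemma chunksB_cons_ne_nil (s : Nat) (l : List (String × String)) (hl : l ≠ []) :
    chunksB (s+1) l = l.take (s+1) :: chunksB (s+1) (l.drop (s+1)) := by
  cases l with
  | nil => exact absurd rfl hl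
  | cons x xs => simp [chunksB]

lemma chunksB_full_prefix (s : Nat) (c l : List (String × String)) (hc : c.length = s + 1) :
    chunksB (s+1) (c ++ l) = c :: chunksB (s+1) l := by
  have hne : c ++ l ≠ [] := by
    cases c with
    | nil => simp at hc
    | cons x xs => simp
  rw [chunksB_cons_ne_nil _ _ hne, List.take_append_of_le_length (by omega),
      List.drop_append_of_le_length (by omega),
      List.take_of_length_le (by omega), List.drop_eq_nil_of_le (by omega)]
  simp

lemma chunksB_nil (s : Nat) : chunksB s [] = [] := by
  cases s <;> simp [chunksB]

lemma loop_chunks (build_type : String) (s : Nat) (hs : 1 ≤ s) :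
    ∀ (rows : List String) (c : List (String × String)) (acc : List (List (String × String))),
      c.length < s →
      (let st := rows.foldl (stepN build_type s) (c, acc)
       if 0 < st.1.length then st.2 ++ [st.1] else st.2)
      = acc ++ chunksB s (c ++ rows.map (fun r => (build_type, r))) := by
  obtain ⟨t, rfl⟩ : ∃ t, s = t + 1 := ⟨s - 1, by omega⟩
  intro rows
  induction rows with
  | nil =>
    intro c acc hc
    simp only [List.foldl_nil, List.map_nil, List.append_nil]
    cases c with
    | nil => simp [chunksB_nil]
    | cons x xs =>
      simp only [List.length_cons]
      rw [if_pos (by omega), chunksB_cons_ne_nil _ _ (by simp),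
          List.take_of_length_le (by simp at hc ⊢; omega),
          List.drop_eq_nil_of_le (by simp at hc ⊢; omega)]
      simp [chunksB_nil]
  | cons r rest ih =>
    intro c acc hc
    simp only [List.foldl_cons, List.map_cons]
    by_cases h : t + 1 ≤ (c ++ [(build_type, r)]).length
    · have hstep : stepN build_type (t+1) (c, acc) r = ([], acc ++ [c ++ [(build_type, r)]]) := by
        simp only [stepN]; rw [if_pos h]
      rw [hstep, ih [] _ (by simp)]
      have hclen : (c ++ [(build_type, r)]).length = t + 1 := by
        simp only [List.length_append, List.length_cons, List.length_nil] at h ⊢; omega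
      rw [show c ++ (build_type, r) :: List.map (fun r => (build_type, r)) rest
            = (c ++ [(build_type, r)]) ++ List.map (fun r => (build_type, r)) rest by simp]
      rw [chunksB_full_prefix _ _ _ hclen]
      simp
  
    · have hstep : stepN build_type (t+1) (c, acc) r = (c ++ [(build_type, r)], acc) := by
        simp only [stepN]; rw [if_neg h]
      rw [hstep, ih _ _ (by simp only [List.length_append, List.length_cons, List.length_nil] at h ⊢; omega)]
      simp

-- ===== VERDICT (by name: the statement is the Claim_ definition above) =====
theorem divide_rows_list_spec : Claim_equal_divide_rows_list := by
  intro build_type org_rows chunk_size _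
  unfold Spec_divide_rows_list divide_rows_list divide_rows_list_alt
  rw [stepA_eq_stepN]
  have hs : 1 ≤ (if 0 < chunk_size then chunk_size.toNat else 1) := by split <;> omega
  have := loop_chunks build_type _ hs org_rows [] []
    (by simpa using hs)
  simpa using this
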